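-- pv_equiv track=rewrite | github.com/jagabu85/Tmp | file-statistics/test.py | count_lines_of_each_type
-- ===== SOURCE A (Python) =====
-- def count_lines_of_each_type(line_type_list):
--     i = 0
--     while line_type_list[i] != "function":
--         i += 1
--
--     line_info = []
--     local_counts = create_counts()
--     general_counts = create_counts()
--     for line_type in line_type_list[i:]:
--         if line_type == "function":
--             line_info.append(local_counts)
--             local_counts = create_counts()
--         increment_count(local_counts, line_type)
--         increment_count(general_counts, line_type)
--     return line_info, general_counts
--
-- def increment_count(count, line_type):
--     if line_type == "blank":
--         count["blank"] += 1
--     elif line_type == "comment":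
--         count["comment"] += 1
--     elif line_type == "code" or "function":
--         count["code"] += 1
--
-- def create_counts():
--     count = {
--         "code": 0,
--         "blank": 0,
--         "comment": 0
--     }
--     return count
-- ===== SOURCE B (Python) =====
-- def _segment_counts(seg):
--     c = {"code": 0, "blank": 0, "comment": 0}
--     for t in seg:
--         if t == "blank":
--             c["blank"] += 1
--         elif t == "comment":
--             c["comment"] += 1
--         else:
--             c["code"] += 1
--     return c
--
--
-- def count_lines_of_each_type(line_type_list):
--     rest = line_type_list[line_type_list.index("function"):]
--     segments = []
--     cur = []
--     for t in rest:
--         if t == "function":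
--             segments.append(cur)
--             cur = [t]
--         else:
--             cur.append(t)
--     # the final open segment (cur) is never emitted
--     return [_segment_counts(s) for s in segments], _segment_counts(rest)
-- ===== Notes on version B (the rewrite author's own statement) =====
-- stated objective: alternative
-- what changed: B first splits the tail (from the first 'function') into explicit segments, one per 'function' occurrence, and then maps an independent counting pass over the segments (dropping the open last one), instead of A's single interleaved loop that threads local and general count dicts and flushes on each 'function'.
import Mathlib
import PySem

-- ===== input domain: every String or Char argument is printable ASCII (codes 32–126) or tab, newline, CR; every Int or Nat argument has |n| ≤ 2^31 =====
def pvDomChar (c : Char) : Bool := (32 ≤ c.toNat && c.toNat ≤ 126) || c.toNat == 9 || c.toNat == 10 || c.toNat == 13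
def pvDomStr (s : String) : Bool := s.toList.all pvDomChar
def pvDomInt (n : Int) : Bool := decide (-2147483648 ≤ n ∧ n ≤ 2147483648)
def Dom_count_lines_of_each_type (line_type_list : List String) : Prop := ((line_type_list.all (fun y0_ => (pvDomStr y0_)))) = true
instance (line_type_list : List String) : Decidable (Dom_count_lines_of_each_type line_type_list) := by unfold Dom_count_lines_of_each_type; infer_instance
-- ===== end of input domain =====

-- B splits the tail (from the first "function") into explicit per-"function" segments and
-- maps an independent counting pass over them, instead of A's single interleaved loop
-- threading and flushing count dicts (objective: alternative decomposition, same cost).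


-- ===== PORT A =====

def create_counts : PySem.Dict String Int :=
  PySem.Dict.ofList [("code", 0), ("blank", 0), ("comment", 0)]

def increment_count (count : PySem.Dict String Int) (line_type : String) : PySem.Dict String Int :=
  if line_type == "blank" then count.modify "blank" 0 (· + 1)
  else if line_type == "comment" then count.modify "comment" 0 (· + 1)
  -- Python: `elif line_type == "code" or "function"` — the nonempty string literal is
  -- truthy, so this branch fires for every remaining line_type; ported as that
  -- always-true disjunction.
  else if line_type == "code" || !(("function" : String).isEmpty) then count.modify "code" 0 (· + 1)
  else count

-- the `while line_type_list[i] != "function": i += 1` scan; where the Python raises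
-- IndexError ("function" absent — excluded by Pre_) this total form returns the length
def findFunctionIdx : List String → Nat
  | [] => 0
  | x :: xs => if x == "function" then 0 else findFunctionIdx xs + 1

-- the body of A's for-loop (dicts cross into the output as their item lists)
def stepA (st : List (List (String × Int)) × PySem.Dict String Int × PySem.Dict String Int)
    (line_type : String) : List (List (String × Int)) × PySem.Dict String Int × PySem.Dict String Int :=
  let (line_info, local_counts, general_counts) := st
  let (line_info, local_counts) :=
    if line_type == "function" then (line_info ++ [local_counts.items], create_counts)
    else (line_info, local_counts)
  (line_info, increment_count local_counts line_type, increment_count general_counts line_type)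

def count_lines_of_each_type (line_type_list : List String) : (List (List (String × Int))) × (List (String × Int)) :=
  let i := findFunctionIdx line_type_list
  let s := (PySem.List.slice line_type_list (some (i : Int)) none).foldl stepA
    ([], create_counts, create_counts)
  (s.1, s.2.2.items)

-- ===== PORT B =====

def segment_counts (seg : List String) : PySem.Dict String Int :=
  seg.foldl
    (fun c t =>
      if t == "blank" then c.modify "blank" 0 (· + 1)
      else if t == "comment" then c.modify "comment" 0 (· + 1)
      else c.modify "code" 0 (· + 1))
    (PySem.Dict.ofList [("code", 0), ("blank", 0), ("comment", 0)])

-- the body of B's segment-splitting loop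
def split_step (st : List (List String) × List String) (t : String) : List (List String) × List String :=
  if t == "function" then (st.1 ++ [st.2], [t]) else (st.1, st.2 ++ [t])

def count_lines_of_each_type_alt (line_type_list : List String) : (List (List (String × Int))) × (List (String × Int)) :=
  match PySem.List.index? line_type_list "function" with
  | none => ([], (segment_counts []).items)  -- Python B raises ValueError here (outside Pre_)
  | some i =>
    let rest := PySem.List.slice line_type_list (some (i : Int)) none
    let sc := rest.foldl split_step ([], [])
    -- the final open segment (sc.2) is never emitted
    (sc.1.map (fun s => (segment_counts s).items), (segment_counts rest).items)

-- ===== PRECONDITION & SPEC =====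
-- A raises IndexError (and B ValueError) when "function" never occurs; Pre_ excludes exactly those inputs.
def Pre_count_lines_of_each_type (line_type_list : List String) : Prop :=
  "function" ∈ line_type_list
instance (line_type_list : List String) : Decidable (Pre_count_lines_of_each_type line_type_list) := by unfold Pre_count_lines_of_each_type; infer_instance

def pvWitness_count_lines_of_each_type : List String := ["comment", "function", "blank", "function", "code"]

def Spec_count_lines_of_each_type (line_type_list : List String) (out : (List (List (String × Int))) × (List (String × Int))) : Prop := out = count_lines_of_each_type_alt line_type_list
instance (line_type_list : List String) (out : (List (List (String × Int))) × (List (String × Int))) : Decidable (Spec_count_lines_of_each_type line_type_list out) := by unfold Spec_count_lines_of_each_type; infer_instance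

-- ===== CLAIM (what is proved, stated in full; the proofs are below) =====
def Claim_equal_count_lines_of_each_type : Prop := ∀ (line_type_list : List String), Dom_count_lines_of_each_type line_type_list → Pre_count_lines_of_each_type line_type_list → Spec_count_lines_of_each_type line_type_list (count_lines_of_each_type line_type_list)

-- ===== LEMMAS AND PROOFS =====

-- B's one-element counting step equals A's increment_count
theorem incB_eq_increment_count :
    (fun (c : PySem.Dict String Int) t =>
      if t == "blank" then c.modify "blank" 0 (· + 1)
      else if t == "comment" then c.modify "comment" 0 (· + 1)
      else c.modify "code" 0 (· + 1)) = increment_count := by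
  funext c t
  simp only [increment_count, String.isEmpty]
  split_ifs <;> simp_all

theorem segment_counts_eq_foldl (seg : List String) :
    segment_counts seg = seg.foldl increment_count create_counts := by
  rw [segment_counts, incB_eq_increment_count]; rfl

theorem segment_counts_append (seg : List String) (t : String) :
    segment_counts (seg ++ [t]) = increment_count (segment_counts seg) t := by
  simp [segment_counts_eq_foldl]

theorem foldB_shift (xs : List String) : ∀ (segs : List (List String)) (cur : List String),
    xs.foldl split_step (segs, cur) =
      (segs ++ (xs.foldl split_step ([], cur)).1, (xs.foldl split_step ([], cur)).2) := by
  induction xs with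
  | nil => intro segs cur; simp
  | cons x xs ih =>
    intro segs cur
    simp only [List.foldl_cons, split_step, List.nil_append]
    by_cases hx : (x == "function") = true
    · simp only [hx, if_true]
      rw [ih (segs ++ [cur]) [x], ih [cur] [x]]
      simp
    · simp only [hx, Bool.false_eq_true, if_false]
      exact ih segs (cur ++ [x])

theorem main_invariant (xs : List String) :
    ∀ (cur : List String) (info : List (List (String × Int))) (gen : PySem.Dict String Int),
    xs.foldl stepA (info, segment_counts cur, gen) =
      ( info ++ ((xs.foldl split_step ([], cur)).1).map (fun s => (segment_counts s).items),
        segment_counts ((xs.foldl split_step ([], cur)).2),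
        xs.foldl increment_count gen ) := by
  induction xs with
  | nil => intro cur info gen; simp
  | cons x xs ih =>
    intro cur info gen
    simp only [List.foldl_cons, stepA, split_step, List.nil_append]
    by_cases hx : (x == "function") = true
    · simp only [hx, if_true]
      have hc : increment_count create_counts x = segment_counts [x] := by
        simp [segment_counts_eq_foldl]
      rw [hc, ih [x] (info ++ [(segment_counts cur).items]) (increment_count gen x)]
      rw [foldB_shift xs [cur] [x]]
      simp
    · simp only [hx, Bool.false_eq_true, if_false]
      rw [← segment_counts_append]
      exact ih (cur ++ [x]) info (increment_count gen x)

theorem index?_eq_find (l : List String) (h : "function" ∈ l) :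
    PySem.List.index? l "function" = some (findFunctionIdx l) := by
  induction l with
  | nil => cases h
  | cons x xs ih =>
    by_cases hx : x = "function"
    · subst hx
      rw [PySem.List.index?_cons_self, findFunctionIdx]
      simp
    · have hmem : "function" ∈ xs := by
        rcases List.mem_cons.mp h with h1 | h1
        · exact absurd h1.symm hx
        · exact h1
      rw [PySem.List.index?_cons_of_ne xs hx, ih hmem]
      simp [findFunctionIdx, hx]

-- ===== VERDICT (by name: the statement is the Claim_ definition above) =====
theorem count_lines_of_each_type_spec : Claim_equal_count_lines_of_each_type := by
  intro l _hdom hpre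
  unfold Spec_count_lines_of_each_type
  simp only [count_lines_of_each_type, count_lines_of_each_type_alt, index?_eq_find l hpre]
  have key := main_invariant (PySem.List.slice l (some ((findFunctionIdx l : Nat) : Int)) none)
    [] [] create_counts
  have h0 : segment_counts [] = create_counts := rfl
  rw [h0] at key
  rw [key]
  simp [segment_counts_eq_foldl]
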